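-- pv_equiv track=rewrite | github.com/natancaballerodalmarco/TrabalhosPython | Aula61/Exercicio03_03.py | solution
-- ===== SOURCE A (Python) =====
-- def solution(A):
--     lista = []
--     first = sum(A)
--     second = 0
--     for indice in range(len(A) - 1):
--         first -= A[indice]
--         second += A[indice]
--         diferenca = first - second
--         lista.append(abs(diferenca))
--     return min(lista)
-- ===== SOURCE B (Python) =====
-- def solution(A):
--     total = sum(A)
--     ps = []
--     acc = 0
--     for x in A[:-1]:
--         acc += x
--         ps.append(acc)
--     ps.sort()
--     # binary search: first index whose prefix p has 2*p >= total
--     lo, hi = 0, len(ps)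
--     while lo < hi:
--         mid = (lo + hi) // 2
--         if 2 * ps[mid] < total:
--             lo = mid + 1
--         else:
--             hi = mid
--     # the minimum of |total - 2*p| is attained at a neighbour of the split point
--     cands = []
--     if lo < len(ps):
--         cands.append(abs(total - 2 * ps[lo]))
--     if lo > 0:
--         cands.append(abs(total - 2 * ps[lo - 1]))
--     return min(cands)
-- ===== Notes on version B (the rewrite author's own statement) =====
-- stated objective: alternative
-- what changed: Instead of A's linear scan over every split difference, B sorts the prefix sums and binary-searches for the prefix closest to total/2; only the two neighbours of the insertion point are candidates for min |total - 2*p|, so the minimum is taken over at most two values.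
import Mathlib
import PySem

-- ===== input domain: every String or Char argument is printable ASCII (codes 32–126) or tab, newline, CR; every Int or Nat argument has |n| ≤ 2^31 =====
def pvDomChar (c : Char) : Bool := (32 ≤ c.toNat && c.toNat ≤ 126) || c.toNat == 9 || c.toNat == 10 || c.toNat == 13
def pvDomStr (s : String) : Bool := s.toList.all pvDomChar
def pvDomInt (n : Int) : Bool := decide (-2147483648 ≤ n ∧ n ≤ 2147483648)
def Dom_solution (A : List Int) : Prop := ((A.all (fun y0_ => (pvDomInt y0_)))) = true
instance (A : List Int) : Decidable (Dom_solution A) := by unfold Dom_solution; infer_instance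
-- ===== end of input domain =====

-- B sorts the prefix sums and binary-searches for the prefix nearest total/2, taking the min over
-- the two neighbours of the insertion point instead of scanning every split difference; objective: alternative.

-- ===== PORT A =====
-- loop state: (lista, first, second); A[indice] is always in range for indice ∈ range(len(A)-1),
-- so pyGetD with default 0 is exact; min(lista) raises ValueError on empty lista, excluded by Pre_.
def solution (A : List Int) : Int :=
  let st := (PySem.List.pyRange 0 ((A.length : Int) - 1) 1).foldl
    (fun (st : List Int × Int × Int) indice =>
      let first := st.2.1 - PySem.List.pyGetD A indice 0
      let second := st.2.2 + PySem.List.pyGetD A indice 0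
      (st.1 ++ [|first - second|], first, second))
    ([], A.sum, 0)
  (PySem.List.min? st.1 (fun x => x)).getD 0

-- ===== PORT B =====
-- B's hand-written while-loop binary search (Source B uses no imports, so bisect is written out);
-- ported as recursion on the shrinking interval, mid = (lo+hi)//2 via Python floor division.
def pvBSearchAux : Nat → List Int → Int → Int → Int → Int
  | 0, _, _, lo, _ => lo
  | k + 1, ps, total, lo, hi =>
    if lo < hi then
      let mid := PySem.Int.floordiv (lo + hi) 2
      if 2 * PySem.List.pyGetD ps mid 0 < total then pvBSearchAux k ps total (mid + 1) hi
      else pvBSearchAux k ps total lo mid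
    else lo

-- fuel (hi-lo).toNat only makes the loop total: the interval shrinks by ≥ 1 each iteration
def pvBSearch (ps : List Int) (total lo hi : Int) : Int :=
  pvBSearchAux (hi - lo).toNat ps total lo hi

-- ps.sort() mutates the local list only; min(cands) raises ValueError on empty cands (len(A) ≤ 1), excluded by Pre_.
def solution_alt (A : List Int) : Int :=
  let total := A.sum
  let st := (PySem.List.slice A none (some (-1))).foldl
    (fun (st : List Int × Int) x => (st.1 ++ [st.2 + x], st.2 + x)) ([], 0)
  let ps := PySem.List.sorted st.1 (fun x => x) false
  let lo := pvBSearch ps total 0 (ps.length : Int)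
  let cands := (if lo < (ps.length : Int) then [|total - 2 * PySem.List.pyGetD ps lo 0|] else [])
    ++ (if 0 < lo then [|total - 2 * PySem.List.pyGetD ps (lo - 1) 0|] else [])
  (PySem.List.min? cands (fun x => x)).getD 0

-- ===== PRECONDITION & SPEC =====
-- Pre_ excludes exactly len(A) ≤ 1, where both Pythons raise ValueError (min of an empty sequence).
def Pre_solution (A : List Int) : Prop := 2 ≤ A.length
instance (A : List Int) : Decidable (Pre_solution A) := by unfold Pre_solution; infer_instance
def pvWitness_solution : List Int := [3, 1, 2, 4, 3]
def Spec_solution (A : List Int) (out : Int) : Prop := out = solution_alt A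
instance (A : List Int) (out : Int) : Decidable (Spec_solution A out) := by unfold Spec_solution; infer_instance

-- ===== CLAIM (what is proved, stated in full; the proofs are below) =====
def Claim_equal_solution : Prop := ∀ (A : List Int), Dom_solution A → Pre_solution A → Spec_solution A (solution A)

-- ===== LEMMAS AND PROOFS =====

-- A's loop state is determined by the prefix list: lista = prefixes.map (|total - 2*.|), first = total - second
theorem pv_fold_corr (total : Int) (L : List Int) : ∀ (s : Int) (pre : List Int),
    L.foldl
      (fun (st : List Int × Int × Int) v =>
        (st.1 ++ [|st.2.1 - v - (st.2.2 + v)|], st.2.1 - v, st.2.2 + v))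
      (pre.map (fun p => |total - 2 * p|), total - s, s)
    = ((L.foldl (fun (st : List Int × Int) x => (st.1 ++ [st.2 + x], st.2 + x)) (pre, s)).1.map
         (fun p => |total - 2 * p|),
       total - (L.foldl (fun (st : List Int × Int) x => (st.1 ++ [st.2 + x], st.2 + x)) (pre, s)).2,
       (L.foldl (fun (st : List Int × Int) x => (st.1 ++ [st.2 + x], st.2 + x)) (pre, s)).2) := by
  induction L with
  | nil => intro s pre; rfl
  | cons x L ih =>
    intro s pre
    simp only [List.foldl_cons]
    have h1 : total - s - x - (s + x) = total - 2 * (s + x) := by ring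
    have h2 : total - s - x = total - (s + x) := by ring
    rw [h1, h2]
    simpa using ih (s + x) (pre ++ [s + x])

-- the indexed loop over range(len(A)-1) is the element loop over A.dropLast
theorem pv_fold_idx (A : List Int) (h : 1 ≤ A.length) :
    (PySem.List.pyRange 0 ((A.length : Int) - 1) 1).foldl
      (fun (st : List Int × Int × Int) indice =>
        let first := st.2.1 - PySem.List.pyGetD A indice 0
        let second := st.2.2 + PySem.List.pyGetD A indice 0
        (st.1 ++ [|first - second|], first, second))
      ([], A.sum, 0)
    = A.dropLast.foldl
      (fun (st : List Int × Int × Int) v =>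
        (st.1 ++ [|st.2.1 - v - (st.2.2 + v)|], st.2.1 - v, st.2.2 + v))
      ([], A.sum, 0) := by
  have hlen : ((A.length : Int) - 1) = ((A.dropLast.length : Int)) := by
    have := List.length_dropLast (xs := A)
    omega
  rw [hlen]
  calc (PySem.List.pyRange 0 ((A.dropLast.length : Int)) 1).foldl
        (fun (st : List Int × Int × Int) indice =>
          let first := st.2.1 - PySem.List.pyGetD A indice 0
          let second := st.2.2 + PySem.List.pyGetD A indice 0
          (st.1 ++ [|first - second|], first, second))
        ([], A.sum, 0)
      = (PySem.List.pyRange 0 ((A.dropLast.length : Int)) 1).foldl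
        (fun (st : List Int × Int × Int) j =>
          (fun (st : List Int × Int × Int) v =>
            (st.1 ++ [|st.2.1 - v - (st.2.2 + v)|], st.2.1 - v, st.2.2 + v)) st
            (PySem.List.pyGetD A.dropLast j 0))
        ([], A.sum, 0) := by
        refine PySem.List.foldl_congr_mem _ _ _ _ ?_
        intro acc j hj
        have hj' := (PySem.List.mem_pyRange_one).1 hj
        have h0 : 0 ≤ j := hj'.1
        have hlt : j.toNat < A.dropLast.length := by omega
        have hlt2 : j.toNat < A.length := by
          have := List.length_dropLast (xs := A); omega
        have hget : PySem.List.pyGetD A j 0 = PySem.List.pyGetD A.dropLast j 0 := by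
          rw [PySem.List.pyGetD_of_nonneg A 0 h0, PySem.List.pyGetD_of_nonneg A.dropLast 0 h0]
          rw [List.getD_eq_getElem _ _ hlt2, List.getD_eq_getElem _ _ hlt]
          simp [List.getElem_dropLast]
        simp only [hget]
    _ = A.dropLast.foldl
        (fun (st : List Int × Int × Int) v =>
          (st.1 ++ [|st.2.1 - v - (st.2.2 + v)|], st.2.1 - v, st.2.2 + v))
        ([], A.sum, 0) :=
        PySem.List.foldl_pyRange_zero_pyGetD' A.dropLast 0
          (fun (st : List Int × Int × Int) v =>
            (st.1 ++ [|st.2.1 - v - (st.2.2 + v)|], st.2.1 - v, st.2.2 + v)) ([], A.sum, 0)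

-- binary-search correctness: on an (index-)monotone list the result splits it at total/2
theorem pvBSearchAux_spec (L : List Int) (total : Int)
    (HS : ∀ p q : Nat, p ≤ q → q < L.length → L.getD p 0 ≤ L.getD q 0) :
    ∀ (k : Nat) (lo hi : Int), (hi - lo).toNat ≤ k → 0 ≤ lo → lo ≤ hi → hi ≤ (L.length : Int) →
    (∀ i : Nat, (i : Int) < lo → 2 * L.getD i 0 < total) →
    (∀ i : Nat, hi ≤ (i : Int) → i < L.length → total ≤ 2 * L.getD i 0) →
    0 ≤ pvBSearchAux k L total lo hi ∧ pvBSearchAux k L total lo hi ≤ (L.length : Int) ∧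
    (∀ i : Nat, (i : Int) < pvBSearchAux k L total lo hi → 2 * L.getD i 0 < total) ∧
    (∀ i : Nat, pvBSearchAux k L total lo hi ≤ (i : Int) → i < L.length → total ≤ 2 * L.getD i 0) := by
  intro k
  induction k with
  | zero =>
    intro lo hi hk h0 hlh hhn hlow hhigh
    have : ¬ lo < hi := by omega
    have heq : lo = hi := by omega
    simp only [pvBSearchAux]
    exact ⟨h0, by omega, hlow, fun i h1 h2 => hhigh i (by omega) h2⟩
  | succ k ih =>
    intro lo hi hk h0 hlh hhn hlow hhigh
    simp only [pvBSearchAux]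
    by_cases h : lo < hi
    · simp only [h, if_pos]
      have hfd : PySem.Int.floordiv (lo + hi) 2 = (lo + hi) / 2 := by
        simp [PySem.Int.floordiv, Int.fdiv_eq_ediv]
      have hm1 : lo ≤ PySem.Int.floordiv (lo + hi) 2 := by omega
      have hm2 : PySem.Int.floordiv (lo + hi) 2 < hi := by omega
      set mid := PySem.Int.floordiv (lo + hi) 2 with hmid
      have hmnn : 0 ≤ mid := le_trans h0 hm1
      have hmlt : mid.toNat < L.length := by omega
      have hget : PySem.List.pyGetD L mid 0 = L.getD mid.toNat 0 :=
        PySem.List.pyGetD_of_nonneg L 0 hmnn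
      by_cases hc : 2 * PySem.List.pyGetD L mid 0 < total
      · simp only [hc, if_pos]
        refine ih (mid + 1) hi (by omega) (by omega) (by omega) hhn ?_ hhigh
        intro i hi'
        have hile : i ≤ mid.toNat := by omega
        have := HS i mid.toNat hile hmlt
        rw [hget] at hc
        omega
      · simp only [hc, if_neg, not_false_iff]
        refine ih lo mid (by omega) h0 hm1 (by omega) hlow ?_
        intro i hi1 hi2
        have hge : mid.toNat ≤ i := by omega
        have := HS mid.toNat i hge hi2
        rw [hget] at hc
        omega
    · simp only [h, if_neg, not_false_iff]
      exact ⟨h0, by omega, fun i h' => hlow i h', fun i h1 h2 => hhigh i (by omega) h2⟩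

-- the min of |total - 2*p| over a nonempty list P equals B's two-candidate min over sorted P
theorem pv_min_eq (total : Int) (P : List Int) (hne : P ≠ []) :
    (PySem.List.min? (P.map (fun p => |total - 2 * p|)) (fun x => x)).getD 0
    = (fun lo =>
        (PySem.List.min?
          ((if lo < ((PySem.List.sorted P (fun x => x) false).length : Int) then
              [|total - 2 * PySem.List.pyGetD (PySem.List.sorted P (fun x => x) false) lo 0|] else [])
            ++ (if 0 < lo then
              [|total - 2 * PySem.List.pyGetD (PySem.List.sorted P (fun x => x) false) (lo - 1) 0|] else []))
          (fun x => x)).getD 0)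
      (pvBSearch (PySem.List.sorted P (fun x => x) false) total 0
        ((PySem.List.sorted P (fun x => x) false).length : Int)) := by
  beta_reduce
  set L := PySem.List.sorted P (fun x => x) false with hL
  have hperm : L.Perm P := PySem.List.sorted_perm P (fun x => x) false
  have hlen : L.length = P.length := hperm.length_eq
  have hLne : L ≠ [] := by
    intro h0; apply hne; have := hperm.length_eq; rw [h0] at this; simpa using (List.length_eq_zero_iff.mp this.symm)
  have HS : ∀ p q : Nat, p ≤ q → q < L.length → L.getD p 0 ≤ L.getD q 0 := by
    intro p q hpq hq
    have hp : p < L.length := Nat.lt_of_le_of_lt hpq hq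
    rw [List.getD_eq_getElem _ _ hp, List.getD_eq_getElem _ _ hq]
    exact PySem.List.sorted_id_getElem_mono P hpq hq
  have hspec := pvBSearchAux_spec L total HS (((L.length : Int) - 0).toNat) 0 (L.length : Int)
    le_rfl le_rfl (by positivity) le_rfl (by intro i hi; omega) (by intro i h1 h2; omega)
  set r := pvBSearch L total 0 (L.length : Int) with hr
  rw [show pvBSearchAux (((L.length : Int) - 0).toNat) L total 0 (L.length : Int) = r from rfl] at hspec
  obtain ⟨hr0, hrn, hlow, hhigh⟩ := hspec
  set f : Int → Int := fun p => |total - 2 * p| with hf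
  -- candidate list
  set cands := (if r < (L.length : Int) then [|total - 2 * PySem.List.pyGetD L r 0|] else [])
    ++ (if 0 < r then [|total - 2 * PySem.List.pyGetD L (r - 1) 0|] else []) with hc
  have hcne : cands ≠ [] := by
    rcases lt_or_ge r (L.length : Int) with h | h
    · simp [hc, h]
    · have hrpos : 0 < r := by
        have : 0 < L.length := List.length_pos_iff.mpr hLne
        omega
      simp [hc, hrpos]
  -- every candidate is an f-value of an element of P
  have hcand_mem : ∀ c ∈ cands, c ∈ P.map f := by
    intro c hcmem
    simp only [hc, List.mem_append] at hcmem
    have hx : ∃ j : Nat, j < L.length ∧ c = f (L.getD j 0) := by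
      rcases hcmem with hcm | hcm
      · rcases lt_or_ge r (L.length : Int) with h | h
        · rw [if_pos h] at hcm
          simp only [List.mem_singleton] at hcm
          refine ⟨r.toNat, by omega, ?_⟩
          rw [hcm, PySem.List.pyGetD_of_nonneg L 0 hr0, hf]
        · rw [if_neg (by omega)] at hcm; simp at hcm
      · rcases lt_or_ge 0 r with h | h
        · rw [if_pos h] at hcm
          simp only [List.mem_singleton] at hcm
          refine ⟨(r - 1).toNat, by omega, ?_⟩
          rw [hcm, PySem.List.pyGetD_of_nonneg L 0 (by omega), hf]
        · rw [if_neg (by omega)] at hcm; simp at hcm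
    obtain ⟨j, hj, hcv⟩ := hx
    have : L.getD j 0 ∈ L := by
      rw [List.getD_eq_getElem _ _ hj]; exact List.getElem_mem hj
    exact List.mem_map.mpr ⟨L.getD j 0, hperm.mem_iff.mp this, hcv.symm⟩
  -- every f-value of an element of P dominates some candidate
  have hdom : ∀ y ∈ P.map f, ∃ c ∈ cands, c ≤ y := by
    intro y hy
    obtain ⟨p, hp, hyv⟩ := List.mem_map.mp hy
    obtain ⟨i, hiL, hig⟩ := List.mem_iff_getElem.mp (hperm.mem_iff.mpr hp)
    have hgd : L.getD i 0 = p := by rw [List.getD_eq_getElem _ _ hiL]; exact hig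
    rcases lt_or_ge (i : Int) r with hcase | hcase
    · -- left side: candidate at r-1
      have hrpos : 0 < r := by omega
      have hridx : (r - 1).toNat < L.length := by omega
      have hc2 : |total - 2 * PySem.List.pyGetD L (r - 1) 0| ∈ cands := by
        simp [hc, hrpos]
      refine ⟨_, hc2, ?_⟩
      rw [PySem.List.pyGetD_of_nonneg L 0 (by omega)]
      have hm := HS i (r - 1).toNat (by omega) hridx
      have hlt1 := hlow i hcase
      have hlt2 := hlow (r - 1).toNat (by omega)
      rw [← hyv, ← hgd, hf]
      have e1 : |total - 2 * L.getD (r-1).toNat 0| = total - 2 * L.getD (r-1).toNat 0 := abs_of_nonneg (by omega)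
      have e2 : |total - 2 * L.getD i 0| = total - 2 * L.getD i 0 := abs_of_nonneg (by omega)
      simp only []
      rw [e1, e2]; omega
    · -- right side: candidate at r
      have hrlt : r < (L.length : Int) := by omega
      have hc1 : |total - 2 * PySem.List.pyGetD L r 0| ∈ cands := by
        simp [hc, hrlt]
      refine ⟨_, hc1, ?_⟩
      rw [PySem.List.pyGetD_of_nonneg L 0 hr0]
      have hm := HS r.toNat i (by omega) hiL
      have hge1 := hhigh i hcase hiL
      have hge2 := hhigh r.toNat (by omega) (by omega)
      rw [← hyv, ← hgd, hf]
      have e1 : |total - 2 * L.getD r.toNat 0| = -(total - 2 * L.getD r.toNat 0) := abs_of_nonpos (by omega)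
      have e2 : |total - 2 * L.getD i 0| = -(total - 2 * L.getD i 0) := abs_of_nonpos (by omega)
      simp only []
      rw [e1, e2]; omega
  -- both min? values exist and are equal
  have hPm : P.map f ≠ [] := by simpa using hne
  obtain ⟨v1, hv1⟩ : ∃ v, PySem.List.min? (P.map f) (fun x => x) = some v := by
    rcases h : PySem.List.min? (P.map f) (fun x => x) with _ | v
    · exact absurd ((PySem.List.min?_eq_none_iff _ _).mp h) hPm
    · exact ⟨v, rfl⟩
  obtain ⟨v2, hv2⟩ : ∃ v, PySem.List.min? cands (fun x => x) = some v := by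
    rcases h : PySem.List.min? cands (fun x => x) with _ | v
    · exact absurd ((PySem.List.min?_eq_none_iff _ _).mp h) hcne
    · exact ⟨v, rfl⟩
  have hv1mem := PySem.List.min?_mem hv1
  have hv2mem := PySem.List.min?_mem hv2
  have hv1min := PySem.List.min?_isMin hv1
  have hv2min := PySem.List.min?_isMin hv2
  have h12 : v1 ≤ v2 := hv1min v2 (hcand_mem v2 hv2mem)
  have h21 : v2 ≤ v1 := by
    obtain ⟨c, hcm, hcle⟩ := hdom v1 hv1mem
    exact le_trans (hv2min c hcm) hcle
  simp only [hv1, hv2, Option.getD_some]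
  omega

theorem solution_eq (A : List Int) (h : 2 ≤ A.length) : solution A = solution_alt A := by
  unfold solution solution_alt
  rw [PySem.List.slice_to_neg_one, pv_fold_idx A (by omega)]
  have e : ((([] : List Int), A.sum, (0 : Int)) : List Int × Int × Int)
      = (([] : List Int).map (fun p => |A.sum - 2 * p|), A.sum - 0, 0) := by simp
  rw [e, pv_fold_corr A.sum A.dropLast 0 []]
  have hne : (A.dropLast.foldl (fun (st : List Int × Int) x => (st.1 ++ [st.2 + x], st.2 + x)) (([] : List Int), 0)).1 ≠ [] := by
    have hlen : ∀ (L : List Int) (pre : List Int) (s : Int),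
        (L.foldl (fun (st : List Int × Int) x => (st.1 ++ [st.2 + x], st.2 + x)) (pre, s)).1.length
        = pre.length + L.length := by
      intro L
      induction L with
      | nil => intro pre s; simp
      | cons x L ih => intro pre s; simp [List.foldl_cons, ih]; omega
    intro h0
    have := hlen A.dropLast [] 0
    rw [h0] at this
    simp [List.length_dropLast] at this
    omega
  exact pv_min_eq A.sum _ hne

-- ===== VERDICT (by name: the statement is the Claim_ definition above) =====
theorem solution_spec : Claim_equal_solution := by
  intro A _ hpre
  unfold Spec_solution
  exact solution_eq A (by unfold Pre_solution at hpre; omega)
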